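-- pv_equiv track=rewrite | github.com/avechir/d_cv-classification_using_structuraldescription | matching/countvotes.py | countVotes
-- ===== SOURCE A (Python) =====
-- def countVotes(numofetalons, minhammingdistances, closestetalon, threshold):
--     votesnumber = []
--     for x in range(numofetalons):
--         count = 0
--         for i in range(len(closestetalon)):
--             if (closestetalon[i] == x):
--                 if(minhammingdistances[i]<=threshold):
--                     count = count + 1
--         votesnumber.append(count)
--     return votesnumber
-- ===== SOURCE B (Python) =====
-- def countVotes(numofetalons, minhammingdistances, closestetalon, threshold):
--     votes = [0] * numofetalons
--     for c, d in zip(closestetalon, minhammingdistances):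
--         if 0 <= c < numofetalons and d <= threshold:
--             votes[c] += 1
--     return votes
-- ===== Notes on version B (the rewrite author's own statement) =====
-- stated objective: faster
-- what changed: Replaces the per-etalon rescans of the vote list (one full pass over closestetalon for every etalon index) with a single pass that increments a zero-initialised bucket array indexed by the vote's etalon.
import Mathlib
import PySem

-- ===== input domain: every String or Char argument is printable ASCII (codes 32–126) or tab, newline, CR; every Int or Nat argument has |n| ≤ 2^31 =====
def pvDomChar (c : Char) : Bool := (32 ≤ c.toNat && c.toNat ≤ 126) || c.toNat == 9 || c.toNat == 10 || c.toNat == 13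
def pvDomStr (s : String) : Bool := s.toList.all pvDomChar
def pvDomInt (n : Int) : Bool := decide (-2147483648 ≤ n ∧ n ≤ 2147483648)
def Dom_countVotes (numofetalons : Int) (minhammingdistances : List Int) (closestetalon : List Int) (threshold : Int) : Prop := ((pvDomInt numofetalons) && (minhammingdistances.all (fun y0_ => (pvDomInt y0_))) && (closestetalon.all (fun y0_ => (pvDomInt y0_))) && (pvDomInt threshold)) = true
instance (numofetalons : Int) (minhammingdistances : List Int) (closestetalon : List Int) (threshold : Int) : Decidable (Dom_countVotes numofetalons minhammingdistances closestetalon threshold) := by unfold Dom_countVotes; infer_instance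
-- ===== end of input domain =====

-- B replaces A's per-etalon rescans with one bucket-increment pass over the votes (faster, asymptotic).


-- ===== PORT A =====
def countVotes (numofetalons : Int) (minhammingdistances : List Int) (closestetalon : List Int) (threshold : Int) : List Int :=
  (PySem.List.pyRange 0 numofetalons 1).foldl (fun votesnumber x =>
    votesnumber ++ [(PySem.List.pyRange 0 (closestetalon.length : Int) 1).foldl (fun count i =>
      if PySem.List.pyGet? closestetalon i = some x then
        match PySem.List.pyGet? minhammingdistances i with
        | some d => if d ≤ threshold then count + 1 else count
        | none => count  -- Python raises IndexError here; these inputs are outside Pre_countVotes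
      else count) (0 : Int)]) []

-- ===== PORT B =====
-- votes = [0] * numofetalons, then one pass over zip(closestetalon, minhammingdistances)
def countVotes_alt (numofetalons : Int) (minhammingdistances : List Int) (closestetalon : List Int) (threshold : Int) : List Int :=
  (closestetalon.zip minhammingdistances).foldl (fun v p =>
    if 0 ≤ p.1 ∧ p.1 < numofetalons ∧ p.2 ≤ threshold then
      v.set p.1.toNat (v.getD p.1.toNat 0 + 1)
    else v) (List.replicate numofetalons.toNat 0)

-- ===== PRECONDITION & SPEC =====
-- Pre_ excludes exactly the inputs on which A raises IndexError: an in-range etalon index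
-- occurring in closestetalon at a position with no corresponding minhammingdistances entry.
def Pre_countVotes (numofetalons : Int) (minhammingdistances : List Int) (closestetalon : List Int) (threshold : Int) : Prop :=
  ∀ i : Nat, i < closestetalon.length →
    (0 ≤ closestetalon.getD i 0 ∧ closestetalon.getD i 0 < numofetalons) →
    i < minhammingdistances.length
instance (numofetalons : Int) (minhammingdistances : List Int) (closestetalon : List Int) (threshold : Int) : Decidable (Pre_countVotes numofetalons minhammingdistances closestetalon threshold) := by unfold Pre_countVotes; infer_instance
def pvWitness_countVotes : Int × List Int × List Int × Int := (2, [0, 5], [0, 1], 3)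
def Spec_countVotes (numofetalons : Int) (minhammingdistances : List Int) (closestetalon : List Int) (threshold : Int) (out : List Int) : Prop := out = countVotes_alt numofetalons minhammingdistances closestetalon threshold
instance (numofetalons : Int) (minhammingdistances : List Int) (closestetalon : List Int) (threshold : Int) (out : List Int) : Decidable (Spec_countVotes numofetalons minhammingdistances closestetalon threshold out) := by unfold Spec_countVotes; infer_instance

-- ===== CLAIM (what is proved, stated in full; the proofs are below) =====
def Claim_equal_countVotes : Prop := ∀ (numofetalons : Int) (minhammingdistances : List Int) (closestetalon : List Int) (threshold : Int), Dom_countVotes numofetalons minhammingdistances closestetalon threshold → Pre_countVotes numofetalons minhammingdistances closestetalon threshold → Spec_countVotes numofetalons minhammingdistances closestetalon threshold (countVotes numofetalons minhammingdistances closestetalon threshold)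

-- ===== LEMMAS AND PROOFS =====

-- A's inner loop for etalon x is the 0/1-count over the indices of closestetalon
theorem innerA (ce mhd : List Int) (t x : Int) :
    (PySem.List.pyRange 0 (ce.length : Int) 1).foldl (fun count i =>
      if PySem.List.pyGet? ce i = some x then
        match PySem.List.pyGet? mhd i with
        | some d => if d ≤ t then count + 1 else count
        | none => count
      else count) (0 : Int)
    = ((List.range ce.length).countP
        (fun k => (ce[k]? == some x) && decide ((mhd[k]?).getD (t+1) ≤ t)) : Int) := by
  rw [PySem.List.pyRange_one, List.foldl_map]
  have hcong : ∀ (c : Int) (k : Nat), k ∈ List.range ((ce.length : Int) - 0).toNat →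
      (if PySem.List.pyGet? ce (0 + (k:Int)) = some x then
        match PySem.List.pyGet? mhd (0 + (k:Int)) with
        | some d => if d ≤ t then c + 1 else c
        | none => c
      else c)
      = (if ((ce[k]? == some x) && decide ((mhd[k]?).getD (t+1) ≤ t)) = true then c + 1 else c) := by
    intro c k _
    simp only [zero_add, PySem.List.pyGet?_natCast]
    cases h : mhd[k]? with
    | none =>
        simp only [Option.getD_none]
        have : ¬ (t + 1 ≤ t) := by omega
        simp [this]
    | some d => by_cases hd : d ≤ t <;> simp [hd]
  have hf := PySem.List.foldl_congr_mem _ _ _ (0:Int) hcong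
  rw [hf, PySem.List.foldl_if_add_one]
  simp

-- the index-based 0/1-count over closestetalon is a count over the zipped pairs
theorem countP_range_eq_zip (t x : Int) :
    ∀ (ce mhd : List Int),
    (List.range ce.length).countP
        (fun k => (ce[k]? == some x) && decide ((mhd[k]?).getD (t+1) ≤ t))
    = (ce.zip mhd).countP (fun q => (q.1 == x) && decide (q.2 ≤ t)) := by
  intro ce
  induction ce with
  | nil => intro mhd; simp
  | cons a ce' ih =>
    intro mhd
    rw [List.length_cons, List.range_succ_eq_map, List.countP_cons, List.countP_map]
    cases mhd with
    | nil =>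
        have hz : ((a :: ce').zip ([] : List Int)) = [] := by simp
        rw [hz]
        have : (List.range ce'.length).countP
            ((fun k => ((a :: ce')[k]? == some x) && decide (((([]:List Int))[k]?).getD (t+1) ≤ t)) ∘ Nat.succ) = 0 := by
          rw [List.countP_eq_zero]
          intro k _
          simp
        rw [this]
        simp
    | cons d mhd' =>
        have hc : (List.range ce'.length).countP
            ((fun k => ((a :: ce')[k]? == some x) && decide ((((d :: mhd'))[k]?).getD (t+1) ≤ t)) ∘ Nat.succ)
            = (List.range ce'.length).countP
            (fun k => (ce'[k]? == some x) && decide ((mhd'[k]?).getD (t+1) ≤ t)) := by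
          apply List.countP_congr
          intro k _
          simp
        rw [hc, ih mhd']
        rw [List.zip_cons_cons, List.countP_cons]
        by_cases h1 : a = x <;> by_cases h2 : d ≤ t <;> simp [h1, h2]

-- B's bucket pass preserves the length of the vote list
theorem lenB (n t : Int) : ∀ (z : List (Int × Int)) (v : List Int),
    (z.foldl (fun v p =>
      if 0 ≤ p.1 ∧ p.1 < n ∧ p.2 ≤ t then v.set p.1.toNat (v.getD p.1.toNat 0 + 1) else v) v).length
    = v.length := by
  intro z
  induction z with
  | nil => intro v; rfl
  | cons q z' ih =>
    intro v
    rw [List.foldl_cons, ih]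
    split <;> simp

-- each bucket of B's pass ends at its start value plus the count of pairs that hit it
theorem getB (n t : Int) : ∀ (z : List (Int × Int)) (v : List Int), v.length = n.toNat →
    ∀ (j : Nat), j < v.length →
    (z.foldl (fun v p =>
      if 0 ≤ p.1 ∧ p.1 < n ∧ p.2 ≤ t then v.set p.1.toNat (v.getD p.1.toNat 0 + 1) else v) v).getD j 0
    = v.getD j 0 + (z.countP (fun q => decide (0 ≤ q.1 ∧ q.1 < n ∧ q.2 ≤ t) && (q.1.toNat == j)) : Int) := by
  intro z
  induction z with
  | nil => intro v _ j _; simp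
  | cons q z' ih =>
    intro v hv j hj
    rw [List.foldl_cons, List.countP_cons]
    by_cases hg : 0 ≤ q.1 ∧ q.1 < n ∧ q.2 ≤ t
    · have hlt : q.1.toNat < v.length := by
        rw [hv]; omega
      rw [if_pos hg]
      have hlen : (v.set q.1.toNat (v.getD q.1.toNat 0 + 1)).length = v.length := by simp
      have := ih (v.set q.1.toNat (v.getD q.1.toNat 0 + 1)) (by rw [hlen, hv]) j (by rw [hlen]; exact hj)
      rw [this]
      by_cases he : q.1.toNat = j
      · subst he
        rw [List.getD_eq_getElem _ _ hlt, List.getD_eq_getElem _ _ (by simpa using hlt),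
            List.getElem_set_self]
        simp [hg]
        ring
      · rw [List.getD_eq_getElem _ _ hj, List.getD_eq_getElem _ _ (by simpa using hj),
            List.getElem_set_ne (by omega)]
        simp [hg, he]
    · rw [if_neg hg]
      rw [ih v hv j hj]
      simp [hg]

-- the two ports agree on ALL inputs (A's port absorbs the IndexError cases as 0-contributions)
theorem countVotes_eq_alt (n : Int) (mhd ce : List Int) (t : Int) :
    countVotes n mhd ce t = countVotes_alt n mhd ce t := by
  unfold countVotes countVotes_alt
  rw [PySem.List.foldl_append_singleton_eq_map, List.nil_append]
  have hlenB := lenB n t (ce.zip mhd) (List.replicate n.toNat 0)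
  apply List.ext_getElem
  · rw [List.length_map, PySem.List.length_pyRange_one, hlenB, List.length_replicate]
    omega
  · intro j hj1 hj2
    have hjn : j < n.toNat := by
      simpa [PySem.List.length_pyRange_one] using hj1
    rw [List.getElem_map, PySem.List.getElem_pyRange_one _ _ _
      (by rw [PySem.List.length_pyRange_one]; omega)]
    have hA := innerA ce mhd t (0 + (j : Int))
    rw [hA, countP_range_eq_zip]
    have hB := getB n t (ce.zip mhd) (List.replicate n.toNat 0) (by simp) j (by simpa using hjn)
    rw [← List.getD_eq_getElem _ 0 hj2, hB]
    have hcnt : (ce.zip mhd).countP (fun q => (q.1 == 0 + (j:Int)) && decide (q.2 ≤ t))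
        = (ce.zip mhd).countP (fun q => decide (0 ≤ q.1 ∧ q.1 < n ∧ q.2 ≤ t) && (q.1.toNat == j)) := by
      apply List.countP_congr
      intro q _
      by_cases hq : q.1 = (j : Int)
      · have h3 : q.1.toNat = j := by omega
        by_cases ht : q.2 ≤ t
        · simp [hq, ht]
          omega
        · simp [hq, ht]
      · have hne : ¬ (0 ≤ q.1 ∧ q.1 < n ∧ q.2 ≤ t) ∨ q.1.toNat ≠ j := by
          by_cases h1 : 0 ≤ q.1
          · right; omega
          · left; intro hc; omega
        rcases hne with h | h
        · simp [hq, h]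
        · simp [hq, h]
    rw [hcnt]
    simp

-- ===== VERDICT (by name: the statement is the Claim_ definition above) =====
theorem countVotes_spec : Claim_equal_countVotes := by
  intro n mhd ce t _ _
  unfold Spec_countVotes
  exact countVotes_eq_alt n mhd ce t
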